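-- pv_equiv track=rewrite | github.com/GearoidDC/TetrisAI | TetrisPlayNN.py | bumpiness
-- ===== SOURCE A (Python) =====
-- def bumpiness(grid):
--     array_of_bump_heights = [20, 20, 20, 20, 20, 20, 20, 20, 20, 20]
--     average_bumps = 0
--     height = 0
--
--     for i in range(len(grid)):
--         for j in range(len(grid[i])):
--             if grid[i][j] != (0, 0, 0) and i < array_of_bump_heights[j]:
--                 array_of_bump_heights[j] = i
--
--     for i in range(0, 9):
--         average_bumps = average_bumps + abs(array_of_bump_heights[i] - array_of_bump_heights[i + 1])
--
--     for i in range(0, 10):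
--         height = height + abs(array_of_bump_heights[i] -20)
--     return average_bumps, height
-- ===== SOURCE B (Python) =====
-- def bumpiness(grid):
--     heights = []
--     for j in range(10):
--         h = 20
--         for i in range(len(grid)):
--             row = grid[i]
--             if j < len(row) and row[j] != (0, 0, 0):
--                 if i < 20:
--                     h = i
--                 break
--         heights.append(h)
--     bumps = sum(abs(heights[j] - heights[j + 1]) for j in range(9))
--     total = sum(20 - h for h in heights)
--     return bumps, total
-- ===== Notes on version B (the rewrite author's own statement) =====
-- stated objective: alternative
-- what changed: Replaces A's row-major scan of every cell with a running-minimum heights array by a column-major search that finds the first filled cell of each of the 10 columns and stops there (break); the two summation passes are kept.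
-- crash fix: On grids where some row has a filled cell at a column index >= 10, A raises IndexError while B ignores columns beyond the first 10 and returns the bumpiness and height of those columns. — e.g. on bumpiness([[(0,0,0),(0,0,0),(0,0,0),(0,0,0),(0,0,0),(0,0,0),(0,0,0),(0,0,0),(0,0,0),(0,0,0),(1,1,1)]]): A raises IndexError, B returns (0, 0)
import Mathlib
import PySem

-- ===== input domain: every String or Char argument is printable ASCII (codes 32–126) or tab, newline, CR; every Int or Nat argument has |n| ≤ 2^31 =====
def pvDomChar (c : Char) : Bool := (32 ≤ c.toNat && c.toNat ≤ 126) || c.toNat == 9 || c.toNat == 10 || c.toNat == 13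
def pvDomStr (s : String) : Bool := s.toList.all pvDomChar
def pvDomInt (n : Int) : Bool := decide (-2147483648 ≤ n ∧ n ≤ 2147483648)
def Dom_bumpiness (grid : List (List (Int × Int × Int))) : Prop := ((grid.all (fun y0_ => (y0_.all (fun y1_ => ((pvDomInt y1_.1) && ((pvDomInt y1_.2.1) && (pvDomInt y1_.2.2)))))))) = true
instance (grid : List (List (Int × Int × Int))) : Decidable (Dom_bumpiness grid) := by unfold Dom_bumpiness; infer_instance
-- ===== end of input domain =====

-- B replaces A's row-major running-minimum scan over every cell by a column-major
-- first-hit search (break at the first filled cell of each of the 10 columns); alternative, not claimed faster.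

-- ===== PORT A =====
-- inner loop: `for j in range(len(grid[i])): if grid[i][j] != (0,0,0) and i < heights[j]: heights[j] = i`
-- (where Python would raise IndexError — a filled cell at column ≥ 10 — `List.getD _ _ 0` reads 0
--  and `List.set` is a no-op; Pre_bumpiness excludes exactly those inputs)
def bumpInner (i : Nat) (row : List (Int × Int × Int)) (h : List Int) : List Int :=
  (List.range row.length).foldl
    (fun h j =>
      if row.getD j (0, 0, 0) ≠ (0, 0, 0) ∧ (i : Int) < h.getD j 0 then h.set j (i : Int) else h) h

-- outer loop: `for i in range(len(grid))`, carrying the row counter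
def bumpOuter (grid : List (List (Int × Int × Int))) (i0 : Nat) (h : List Int) : List Int :=
  (grid.foldl (fun (st : Nat × List Int) row => (st.1 + 1, bumpInner st.1 row st.2)) (i0, h)).2

def bumpiness (grid : List (List (Int × Int × Int))) : Int × Int :=
  let h := bumpOuter grid 0 [20, 20, 20, 20, 20, 20, 20, 20, 20, 20]
  let average_bumps := (List.range 9).foldl (fun s i => s + |h.getD i 0 - h.getD (i + 1) 0|) 0
  let height := (List.range 10).foldl (fun s i => s + |h.getD i 0 - 20|) 0
  (average_bumps, height)

-- ===== PORT B =====
-- `for i in range(len(grid)): if j < len(row) and row[j] != (0,0,0): (if i < 20: h = i); break`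
-- the loop-with-break over rows is the first index satisfying the test, i.e. findIdx?
-- the break test of B's inner loop
def colPred (j : Nat) (row : List (Int × Int × Int)) : Bool :=
  decide (j < row.length) && decide (row.getD j (0, 0, 0) ≠ (0, 0, 0))

def colHeight (grid : List (List (Int × Int × Int))) (j : Nat) : Int :=
  match grid.findIdx? (colPred j) with
  | some i => if i < 20 then (i : Int) else 20
  | none => 20

def bumpiness_alt (grid : List (List (Int × Int × Int))) : Int × Int :=
  let heights := (List.range 10).map (colHeight grid)
  let bumps := ((List.range 9).map (fun j => |heights.getD j 0 - heights.getD (j + 1) 0|)).sum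
  (bumps, (heights.map (fun h => 20 - h)).sum)

-- ===== PRECONDITION & SPEC =====
-- Pre_ excludes exactly the grids on which Python A raises IndexError: a row with a
-- filled (≠ (0,0,0)) cell at column index ≥ 10.
def Pre_bumpiness (grid : List (List (Int × Int × Int))) : Prop :=
  ∀ row ∈ grid, ∀ c ∈ row.drop 10, c = (0, 0, 0)
instance (grid : List (List (Int × Int × Int))) : Decidable (Pre_bumpiness grid) := by
  unfold Pre_bumpiness; infer_instance

def pvWitness_bumpiness : (List (List (Int × Int × Int))) :=
  [[(1, 2, 3), (0, 0, 0)], [(0, 0, 0), (4, 5, 6)]]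

-- On grids where some row has a filled cell at a column index ≥ 10, A raises IndexError;
-- B only ever inspects the first 10 columns and returns their bumpiness and height.
def Raises_bumpiness (grid : List (List (Int × Int × Int))) : Prop :=
  ∃ row ∈ grid, ∃ c ∈ row.drop 10, c ≠ (0, 0, 0)
instance (grid : List (List (Int × Int × Int))) : Decidable (Raises_bumpiness grid) := by
  unfold Raises_bumpiness; infer_instance

def pvRaiseWitness_bumpiness : (List (List (Int × Int × Int))) :=
  [[(0,0,0),(0,0,0),(0,0,0),(0,0,0),(0,0,0),(0,0,0),(0,0,0),(0,0,0),(0,0,0),(0,0,0),(1,1,1)]]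
def pvRaiseWitnessOut_bumpiness : Int × Int := (0, 0)

def Spec_bumpiness (grid : List (List (Int × Int × Int))) (out : Int × Int) : Prop := out = bumpiness_alt grid
instance (grid : List (List (Int × Int × Int))) (out : Int × Int) : Decidable (Spec_bumpiness grid out) := by unfold Spec_bumpiness; infer_instance

-- ===== CLAIM (what is proved, stated in full; the proofs are below) =====
def Claim_equal_bumpiness : Prop := ∀ (grid : List (List (Int × Int × Int))), Dom_bumpiness grid → Pre_bumpiness grid → Spec_bumpiness grid (bumpiness grid)
def Claim_raises_bumpiness : Prop := (∀ (grid : List (List (Int × Int × Int))), Dom_bumpiness grid → Raises_bumpiness grid → ¬ Pre_bumpiness grid) ∧ (Dom_bumpiness (pvRaiseWitness_bumpiness) ∧ Raises_bumpiness (pvRaiseWitness_bumpiness) ∧ bumpiness_alt (pvRaiseWitness_bumpiness) = pvRaiseWitnessOut_bumpiness)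

-- ===== LEMMAS AND PROOFS =====

-- a set at a different index leaves getD unchanged
theorem getD_set_ne (h : List Int) (a j : Nat) (v : Int) (hne : a ≠ j) :
    (h.set a v).getD j 0 = h.getD j 0 := by
  simp [List.getD_eq_getElem?_getD, hne]

-- effect of the inner fold over an arbitrary list of column indices on one entry
theorem innerFold_getD (i : Nat) (row : List (Int × Int × Int)) (l : List Nat) (h : List Int) (j : Nat) :
    ((l.foldl (fun h j =>
        if row.getD j (0, 0, 0) ≠ (0, 0, 0) ∧ (i : Int) < h.getD j 0 then h.set j (i : Int) else h) h).getD j 0)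
    = if j ∈ l ∧ row.getD j (0, 0, 0) ≠ (0, 0, 0) ∧ (i : Int) < h.getD j 0 then (i : Int)
      else h.getD j 0 := by
  induction l generalizing h with
  | nil => simp
  | cons a l ih =>
    simp only [List.foldl_cons]
    by_cases hja : j = a
    · subst hja
      by_cases hc : row.getD j (0, 0, 0) ≠ (0, 0, 0) ∧ (i : Int) < h.getD j 0
      · simp only [if_pos hc]
        rw [ih]
        by_cases hlen : j < h.length
        · have hval : ((h.set j (i : Int)).getD j 0) = (i : Int) := by
            simp [List.getD_eq_getElem?_getD, hlen]
          rw [hval]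
          have hno : ¬ (j ∈ l ∧ row.getD j (0, 0, 0) ≠ (0, 0, 0) ∧ (i : Int) < (i : Int)) := by
            rintro ⟨-, -, hlt⟩; exact lt_irrefl _ hlt
          rw [if_neg hno, if_pos ⟨by simp, hc⟩]
        · -- here getD j 0 = 0 since j ≥ length, so hc gives (i:Int) < 0, impossible for a Nat cast
          exfalso
          have h0 : h.getD j 0 = 0 := by
            simp [List.getD_eq_getElem?_getD, List.getElem?_eq_none (le_of_not_gt hlen)]
          have h2 := hc.2
          rw [h0] at h2
          omega
      · simp only [if_neg hc]
        rw [ih, if_neg (fun hx => hc hx.2), if_neg (fun hx => hc hx.2)]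
    · have hstep : ∀ h' : List Int,
          ((if row.getD a (0, 0, 0) ≠ (0, 0, 0) ∧ (i : Int) < h'.getD a 0 then h'.set a (i : Int) else h').getD j 0)
          = h'.getD j 0 := by
        intro h'
        split
        · exact getD_set_ne h' a j _ (fun e => hja e.symm)
        · rfl
      rw [ih, hstep]
      simp only [List.mem_cons, hja, false_or]

theorem bumpInner_getD (i : Nat) (row : List (Int × Int × Int)) (h : List Int) (j : Nat) :
    (bumpInner i row h).getD j 0
    = if j < row.length ∧ row.getD j (0, 0, 0) ≠ (0, 0, 0) ∧ (i : Int) < h.getD j 0 then (i : Int)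
      else h.getD j 0 := by
  unfold bumpInner
  rw [innerFold_getD]
  simp [List.mem_range]

theorem bumpOuter_getD (grid : List (List (Int × Int × Int))) (i0 : Nat) (h : List Int) (j : Nat) :
    (bumpOuter grid i0 h).getD j 0
    = match grid.findIdx? (colPred j) with
      | some k => if ((i0 + k : Nat) : Int) < h.getD j 0 then ((i0 + k : Nat) : Int) else h.getD j 0
      | none => h.getD j 0 := by
  induction grid generalizing i0 h with
  | nil => simp [bumpOuter]
  | cons row rest ih =>
    have hstep : bumpOuter (row :: rest) i0 h = bumpOuter rest (i0 + 1) (bumpInner i0 row h) := rfl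
    rw [hstep, ih, List.findIdx?_cons]
    by_cases hp : colPred j row = true
    · rw [if_pos hp]
      have hcond : j < row.length ∧ row.getD j (0, 0, 0) ≠ (0, 0, 0) := by
        simpa [colPred] using hp
      have hv : (bumpInner i0 row h).getD j 0
          = if (i0 : Int) < h.getD j 0 then (i0 : Int) else h.getD j 0 := by
        rw [bumpInner_getD]
        by_cases hlt : (i0 : Int) < h.getD j 0
        · rw [if_pos ⟨hcond.1, hcond.2, hlt⟩, if_pos hlt]
        · rw [if_neg (by tauto), if_neg hlt]
      -- after the first hit the value is ≤ i0, so later rows (index ≥ i0+1) never update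
      have hv' : (bumpInner i0 row h)[j]?.getD 0
          = if (i0 : Int) < h[j]?.getD 0 then (i0 : Int) else h[j]?.getD 0 := hv
      cases hfi : rest.findIdx? (colPred j) with
      | none => simpa using hv
      | some k =>
        simp
        rw [hv']
        split_ifs <;> omega
    · rw [if_neg hp]
      have hcond : ¬ (j < row.length ∧ row.getD j (0, 0, 0) ≠ (0, 0, 0)) := by
        simpa [colPred] using hp
      have hv : (bumpInner i0 row h).getD j 0 = h.getD j 0 := by
        rw [bumpInner_getD, if_neg (by tauto)]
      cases hfi : rest.findIdx? (colPred j) with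
      | none => simpa using hv
      | some k =>
        simp only [Option.map_some]
        rw [hv]
        have : (i0 + 1 + k : Nat) = (i0 + (k + 1) : Nat) := by omega
        rw [this]

-- A's final heights entry equals B's column height, for columns 0..9
theorem heights_agree (grid : List (List (Int × Int × Int))) (j : Nat) (hj : j < 10) :
    (bumpOuter grid 0 [20, 20, 20, 20, 20, 20, 20, 20, 20, 20]).getD j 0 = colHeight grid j := by
  have h20 : ([20, 20, 20, 20, 20, 20, 20, 20, 20, 20] : List Int).getD j 0 = 20 := by
    interval_cases j <;> rfl
  rw [bumpOuter_getD]
  unfold colHeight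
  simp only [h20]
  cases hfi : grid.findIdx? (colPred j) with
  | none => simp
  | some k =>
    simp only [Nat.zero_add]
    by_cases hk : k < 20
    · rw [if_pos (show ((k : Nat) : Int) < 20 by exact_mod_cast hk), if_pos hk]
    · rw [if_neg (show ¬ ((k : Nat) : Int) < 20 by exact_mod_cast hk), if_neg hk]

theorem foldl_add_map (l : List Nat) (g : Nat → Int) (a : Int) :
    l.foldl (fun s i => s + g i) a = a + (l.map g).sum := by
  induction l generalizing a with
  | nil => simp
  | cons x l ih => simp only [List.foldl_cons, List.map_cons, List.sum_cons, ih]; ring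

theorem colHeight_le (grid : List (List (Int × Int × Int))) (j : Nat) : colHeight grid j ≤ 20 := by
  unfold colHeight
  cases hfi : grid.findIdx? (colPred j) with
  | none => simp
  | some k =>
    split <;> omega

theorem getD_map_range (n j : Nat) (g : Nat → Int) (hj : j < n) :
    ((List.range n).map g).getD j 0 = g j := by
  simp [List.getD_eq_getElem?_getD, List.getElem?_map, List.getElem?_range hj]

-- ===== VERDICT (by name: the statement is the Claim_ definition above) =====
theorem bumpiness_spec : Claim_equal_bumpiness := by
  intro grid _ _
  unfold Spec_bumpiness bumpiness bumpiness_alt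
  have hH : ∀ j : Nat, j < 10 →
      (bumpOuter grid 0 [20, 20, 20, 20, 20, 20, 20, 20, 20, 20]).getD j 0
      = ((List.range 10).map (colHeight grid)).getD j 0 := by
    intro j hj
    rw [heights_agree grid j hj, getD_map_range 10 j _ hj]
  simp only
  rw [Prod.mk.injEq]
  constructor
  · -- bumpiness component
    rw [foldl_add_map]
    simp only [Int.zero_add]
    apply congrArg
    apply List.map_congr_left
    intro j hj
    have hj9 : j < 9 := List.mem_range.mp hj
    rw [hH j (by omega), hH (j + 1) (by omega)]
  · -- height component
    rw [foldl_add_map]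
    simp only [Int.zero_add]
    have hmap : ((List.range 10).map (colHeight grid)).map (fun h => 20 - h)
        = (List.range 10).map (fun j => 20 - colHeight grid j) := by
      rw [List.map_map]; rfl
    rw [hmap]
    apply congrArg
    apply List.map_congr_left
    intro j hj
    have hj10 : j < 10 := List.mem_range.mp hj
    rw [hH j hj10, getD_map_range 10 j _ hj10]
    have := colHeight_le grid j
    rw [abs_of_nonpos (by omega)]
    ring

theorem bumpiness_raises : Claim_raises_bumpiness := by
  unfold Claim_raises_bumpiness
  constructor
  · rintro grid _ ⟨row, hrow, c, hc, hne⟩ hPre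
    exact hne (hPre row hrow c hc)
  · exact ⟨by decide, by decide, by decide⟩

-- self-check: the raise witness really lies in the raising region (uses the theorem above)
theorem pvRaiseWitness_bumpiness_ok : Raises_bumpiness pvRaiseWitness_bumpiness :=
  bumpiness_raises.2.2.1
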